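-- pv_equiv track=rewrite | github.com/leedh0209/CodingTest | Week2/1216.py | count
-- ===== SOURCE A (Python) =====
-- def count(startCol, startRow, endCol, endRow, list1, array):
--     length = len(list1)
--     if startCol == endCol:
--         while list1 == list(reversed(list1)) and startRow > 0 and endRow < 99:
--             startRow -= 1
--             endRow += 1
--             list1.insert(0, array[startCol][startRow])
--             list1.append(array[endCol][endRow])
--             if list1 == list(reversed(list1)):
--                 length += 2
--     elif startRow == endRow:
--         while list1 == list(reversed(list1)) and startCol > 0 and endCol < 99:
--             startCol -= 1
--             endCol += 1
--             list1.insert(0, array[startCol][startRow])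
--             list1.append(array[endCol][endRow])
--             if list1 == list(reversed(list1)):
--                 length += 2
--     return length
-- ===== SOURCE B (Python) =====
-- def count(startCol, startRow, endCol, endRow, list1, array):
--     n = len(list1)
--     if list1 != list1[::-1]:
--         return n
--     if startCol == endCol:
--         while startRow > 0 and endRow < 99:
--             startRow -= 1
--             endRow += 1
--             if array[startCol][startRow] != array[endCol][endRow]:
--                 break
--             n += 2
--     elif startRow == endRow:
--         while startCol > 0 and endCol < 99:
--             startCol -= 1
--             endCol += 1
--             if array[startCol][startRow] != array[endCol][endRow]:
--                 break
--             n += 2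
--     return n
-- ===== Notes on version B (the rewrite author's own statement) =====
-- stated objective: alternative
-- what changed: B checks the full list for palindromicity once and then compares only the two newly reached board cells per expansion step (break on mismatch), instead of A's rebuilding the growing list and re-reversing it on every iteration; B also does not mutate list1.
-- outside the precondition, e.g. on count(0, 1, 0, 0, [5], [[1, 5, 1]]): A returns 1, B returns 1; on count(1, 0, 2, 0, [7], [[3], [9], [4], [5]]): A returns 1, B returns 1
import Mathlib
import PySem

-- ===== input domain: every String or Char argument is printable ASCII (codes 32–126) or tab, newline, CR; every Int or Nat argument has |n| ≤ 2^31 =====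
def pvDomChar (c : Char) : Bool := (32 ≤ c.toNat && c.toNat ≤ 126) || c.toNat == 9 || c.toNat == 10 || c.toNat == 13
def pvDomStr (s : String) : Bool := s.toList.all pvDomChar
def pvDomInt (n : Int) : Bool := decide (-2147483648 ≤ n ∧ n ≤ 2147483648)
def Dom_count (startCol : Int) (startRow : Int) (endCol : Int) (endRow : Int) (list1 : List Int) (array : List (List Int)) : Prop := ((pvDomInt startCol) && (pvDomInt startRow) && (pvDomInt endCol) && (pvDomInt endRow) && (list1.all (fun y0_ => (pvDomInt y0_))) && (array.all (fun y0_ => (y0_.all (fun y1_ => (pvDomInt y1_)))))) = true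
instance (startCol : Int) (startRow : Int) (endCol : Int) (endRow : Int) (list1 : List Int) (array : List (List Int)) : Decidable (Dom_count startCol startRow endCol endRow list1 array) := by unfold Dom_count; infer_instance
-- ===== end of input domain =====

-- B replaces A's per-step full-list palindrome re-checks (rebuilding and reversing the
-- growing list each iteration) by comparing only the two newly reached endpoints, valid
-- because extending a palindrome stays a palindrome iff the two added elements are equal.
-- Note: Python A mutates list1 in place (insert/append); B does not. The equivalence
-- proved here is about the RETURN value only.

-- ===== PORT A =====
-- array[c][r] (Python indexing, negative wrap); outside Pre_ (where Python raises) a default 0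
def pvAt (array : List (List Int)) (c r : Int) : Int :=
  (PySem.List.pyGet? ((PySem.List.pyGet? array c).getD []) r).getD 0

-- the first while loop of A (column branch); fuel bounds the iterations (each step needs
-- 0 < sr and er < 99 and moves both toward the bound, so min sr (99-er) iterations suffice)
def countA_loop1 (array : List (List Int)) (col : Int) :
    Nat → Int → Int → List Int → Int → Int
  | 0, _, _, _, len => len
  | fuel+1, sr, er, l, len =>
    if l = l.reverse ∧ 0 < sr ∧ er < 99 then
      countA_loop1 array col fuel (sr - 1) (er + 1)
        (pvAt array col (sr - 1) :: (l ++ [pvAt array col (er + 1)]))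
        (if (pvAt array col (sr - 1) :: (l ++ [pvAt array col (er + 1)])) =
            (pvAt array col (sr - 1) :: (l ++ [pvAt array col (er + 1)])).reverse
         then len + 2 else len)
    else len

-- the second while loop of A (row branch)
def countA_loop2 (array : List (List Int)) (row : Int) :
    Nat → Int → Int → List Int → Int → Int
  | 0, _, _, _, len => len
  | fuel+1, sc, ec, l, len =>
    if l = l.reverse ∧ 0 < sc ∧ ec < 99 then
      countA_loop2 array row fuel (sc - 1) (ec + 1)
        (pvAt array (sc - 1) row :: (l ++ [pvAt array (ec + 1) row]))
        (if (pvAt array (sc - 1) row :: (l ++ [pvAt array (ec + 1) row])) =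
            (pvAt array (sc - 1) row :: (l ++ [pvAt array (ec + 1) row])).reverse
         then len + 2 else len)
    else len

def count (startCol : Int) (startRow : Int) (endCol : Int) (endRow : Int) (list1 : List Int) (array : List (List Int)) : Int :=
  if startCol = endCol then
    countA_loop1 array startCol (min startRow (99 - endRow)).toNat startRow endRow list1 (list1.length : Int)
  else if startRow = endRow then
    countA_loop2 array startRow (min startCol (99 - endCol)).toNat startCol endCol list1 (list1.length : Int)
  else (list1.length : Int)

-- ===== PORT B =====
-- B's while loop, column branch: compare only the two new endpoints, break on mismatch
def countB_loop1 (array : List (List Int)) (col : Int) :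
    Nat → Int → Int → Int → Int
  | 0, _, _, n => n
  | fuel+1, sr, er, n =>
    if 0 < sr ∧ er < 99 then
      if pvAt array col (sr - 1) = pvAt array col (er + 1) then
        countB_loop1 array col fuel (sr - 1) (er + 1) (n + 2)
      else n
    else n

-- B's while loop, row branch
def countB_loop2 (array : List (List Int)) (row : Int) :
    Nat → Int → Int → Int → Int
  | 0, _, _, n => n
  | fuel+1, sc, ec, n =>
    if 0 < sc ∧ ec < 99 then
      if pvAt array (sc - 1) row = pvAt array (ec + 1) row then
        countB_loop2 array row fuel (sc - 1) (ec + 1) (n + 2)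
      else n
    else n

def count_alt (startCol : Int) (startRow : Int) (endCol : Int) (endRow : Int) (list1 : List Int) (array : List (List Int)) : Int :=
  if list1 ≠ list1.reverse then (list1.length : Int)
  else if startCol = endCol then
    countB_loop1 array startCol (min startRow (99 - endRow)).toNat startRow endRow (list1.length : Int)
  else if startRow = endRow then
    countB_loop2 array startRow (min startCol (99 - endCol)).toNat startCol endCol (list1.length : Int)
  else (list1.length : Int)

-- ===== PRECONDITION & SPEC =====
-- Pre_ excludes exactly inputs where a board access of A could raise IndexError: whenever
-- the expansion loop can start, the scanned column/array must be a full 100 cells wide (as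
-- the 100×100 board of the original problem intends) with the start indices inside it.
-- This is slightly narrower than A's exact raising set: A may also return on a short board
-- when a value mismatch stops the scan before the first out-of-range access (see cites).
def Pre_count (startCol : Int) (startRow : Int) (endCol : Int) (endRow : Int) (list1 : List Int) (array : List (List Int)) : Prop :=
  (startCol = endCol →
    (list1 = list1.reverse ∧ 0 < startRow ∧ endRow < 99) →
      (0 ≤ startCol ∧ startCol < (array.length : Int) ∧
       100 ≤ ((PySem.List.pyGet? array startCol).getD []).length ∧
       startRow ≤ (((PySem.List.pyGet? array startCol).getD []).length : Int) ∧
       -((((PySem.List.pyGet? array startCol).getD []).length : Int)) ≤ endRow + 1)) ∧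
  (startCol ≠ endCol → startRow = endRow →
    (list1 = list1.reverse ∧ 0 < startCol ∧ endCol < 99) →
      (100 ≤ array.length ∧ startCol ≤ (array.length : Int) ∧
       -((array.length : Int)) ≤ endCol + 1 ∧
       ∀ row ∈ array, startRow < (row.length : Int) ∧ -((row.length : Int)) ≤ startRow))
instance (startCol : Int) (startRow : Int) (endCol : Int) (endRow : Int) (list1 : List Int) (array : List (List Int)) : Decidable (Pre_count startCol startRow endCol endRow list1 array) := by unfold Pre_count; exact instDecidableAnd

def pvWitness_count : Int × Int × Int × Int × List Int × List (List Int) := (0, 0, 1, 0, [1, 2], [])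

def Spec_count (startCol : Int) (startRow : Int) (endCol : Int) (endRow : Int) (list1 : List Int) (array : List (List Int)) (out : Int) : Prop := out = count_alt startCol startRow endCol endRow list1 array
instance (startCol : Int) (startRow : Int) (endCol : Int) (endRow : Int) (list1 : List Int) (array : List (List Int)) (out : Int) : Decidable (Spec_count startCol startRow endCol endRow list1 array out) := by unfold Spec_count; infer_instance

-- ===== CLAIM (what is proved, stated in full; the proofs are below) =====
def Claim_equal_count : Prop := ∀ (startCol : Int) (startRow : Int) (endCol : Int) (endRow : Int) (list1 : List Int) (array : List (List Int)), Dom_count startCol startRow endCol endRow list1 array → Pre_count startCol startRow endCol endRow list1 array → Spec_count startCol startRow endCol endRow list1 array (count startCol startRow endCol endRow list1 array)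

-- ===== LEMMAS AND PROOFS =====

-- extending a palindrome l by a in front and b in back is a palindrome iff a = b
theorem pal_extend {a b : Int} {l : List Int} (h : l = l.reverse) :
    ((a :: (l ++ [b])) = (a :: (l ++ [b])).reverse) ↔ a = b := by
  constructor
  · intro he
    have : (a :: (l ++ [b])).reverse = b :: (l ++ [a]) := by
      simp [List.reverse_append, ← h]
    rw [this] at he
    exact ((List.cons.injEq _ _ _ _).mp he).1
  · rintro rfl
    simp [List.reverse_append, ← h]

theorem countA_loop1_notpal (array : List (List Int)) (col : Int)
    (fuel : Nat) (sr er : Int) (l : List Int) (len : Int) (h : l ≠ l.reverse) :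
    countA_loop1 array col fuel sr er l len = len := by
  cases fuel with
  | zero => rfl
  | succ fuel => simp [countA_loop1, h]

theorem countA_loop2_notpal (array : List (List Int)) (row : Int)
    (fuel : Nat) (sc ec : Int) (l : List Int) (len : Int) (h : l ≠ l.reverse) :
    countA_loop2 array row fuel sc ec l len = len := by
  cases fuel with
  | zero => rfl
  | succ fuel => simp [countA_loop2, h]

theorem loop1_eq (array : List (List Int)) (col : Int) :
    ∀ (fuel : Nat) (sr er : Int) (l : List Int) (len : Int), l = l.reverse →
      countA_loop1 array col fuel sr er l len = countB_loop1 array col fuel sr er len := by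
  intro fuel
  induction fuel with
  | zero => intro sr er l len _; rfl
  | succ fuel ih =>
    intro sr er l len hpal
    by_cases hg : 0 < sr ∧ er < 99
    · have hc : (l = l.reverse ∧ 0 < sr ∧ er < 99) := ⟨hpal, hg⟩
      rw [countA_loop1, countB_loop1, if_pos hc, if_pos hg]
      by_cases hab : pvAt array col (sr - 1) = pvAt array col (er + 1)
      · have hpal' := (pal_extend hpal).mpr hab
        rw [if_pos hpal', if_pos hab]
        exact ih _ _ _ _ hpal'
      · have hnp : (pvAt array col (sr - 1) :: (l ++ [pvAt array col (er + 1)])) ≠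
            (pvAt array col (sr - 1) :: (l ++ [pvAt array col (er + 1)])).reverse := by
          intro he; exact hab ((pal_extend hpal).mp he)
        rw [if_neg hnp, if_neg hab]
        exact countA_loop1_notpal _ _ _ _ _ _ _ hnp
    · rw [countA_loop1, countB_loop1,
        if_neg (by intro h; exact hg h.2), if_neg hg]

theorem loop2_eq (array : List (List Int)) (row : Int) :
    ∀ (fuel : Nat) (sc ec : Int) (l : List Int) (len : Int), l = l.reverse →
      countA_loop2 array row fuel sc ec l len = countB_loop2 array row fuel sc ec len := by
  intro fuel
  induction fuel with
  | zero => intro sc ec l len _; rfl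
  | succ fuel ih =>
    intro sc ec l len hpal
    by_cases hg : 0 < sc ∧ ec < 99
    · have hc : (l = l.reverse ∧ 0 < sc ∧ ec < 99) := ⟨hpal, hg⟩
      rw [countA_loop2, countB_loop2, if_pos hc, if_pos hg]
      by_cases hab : pvAt array (sc - 1) row = pvAt array (ec + 1) row
      · have hpal' := (pal_extend hpal).mpr hab
        rw [if_pos hpal', if_pos hab]
        exact ih _ _ _ _ hpal'
      · have hnp : (pvAt array (sc - 1) row :: (l ++ [pvAt array (ec + 1) row])) ≠
            (pvAt array (sc - 1) row :: (l ++ [pvAt array (ec + 1) row])).reverse := by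
          intro he; exact hab ((pal_extend hpal).mp he)
        rw [if_neg hnp, if_neg hab]
        exact countA_loop2_notpal _ _ _ _ _ _ _ hnp
    · rw [countA_loop2, countB_loop2,
        if_neg (by intro h; exact hg h.2), if_neg hg]

-- ===== VERDICT (by name: the statement is the Claim_ definition above) =====
theorem count_spec : Claim_equal_count := by
  intro startCol startRow endCol endRow list1 array _ _
  unfold Spec_count count count_alt
  by_cases hpal : list1 = list1.reverse
  · rw [if_neg (not_not_intro hpal)]
    by_cases h1 : startCol = endCol
    · rw [if_pos h1, if_pos h1]
      exact loop1_eq _ _ _ _ _ _ _ hpal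
    · rw [if_neg h1, if_neg h1]
      by_cases h2 : startRow = endRow
      · rw [if_pos h2, if_pos h2]
        exact loop2_eq _ _ _ _ _ _ _ hpal
      · rw [if_neg h2, if_neg h2]
  · rw [if_pos hpal]
    by_cases h1 : startCol = endCol
    · rw [if_pos h1]
      exact countA_loop1_notpal _ _ _ _ _ _ _ hpal
    · rw [if_neg h1]
      by_cases h2 : startRow = endRow
      · rw [if_pos h2]
        exact countA_loop2_notpal _ _ _ _ _ _ _ hpal
      · rw [if_neg h2]
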